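-- pv_equiv track=rewrite | github.com/lucasbenevinuto/Python | EncontrarElemento.py | encontrar_maior_elemento
-- ===== SOURCE A (Python) =====
-- def encontrar_maior_elemento(matriz):
--     maior_elemento = matriz[0][0]
--     linha_maior_elemento = 0
--     coluna_maior_elemento = 0
--
--     for i in range(len(matriz)):
--         for j in range(len(matriz[i])):
--             if matriz[i][j] > maior_elemento:
--                 maior_elemento = matriz[i][j]
--                 linha_maior_elemento = i
--                 coluna_maior_elemento = j
--
--     return maior_elemento, linha_maior_elemento, coluna_maior_elemento
-- ===== SOURCE B (Python) =====
-- def encontrar_maior_elemento(matriz):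
--     # pass 1: compute the maximum value only
--     maior = matriz[0][0]
--     for linha in matriz:
--         for v in linha:
--             if v > maior:
--                 maior = v
--     # pass 2: return at the first position holding that value (row-major)
--     for i, linha in enumerate(matriz):
--         for j, v in enumerate(linha):
--             if v == maior:
--                 return maior, i, j
--     return maior, 0, 0
-- ===== Notes on version B (the rewrite author's own statement) =====
-- stated objective: alternative
-- what changed: Splits A's single combined running-max-with-indices loop into two staged passes: a value-only maximum pass with no index bookkeeping, then an early-returning search for the first row-major position equal to that maximum (equivalent because A's recorded position is exactly the first occurrence of the maximum).
import Mathlib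
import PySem

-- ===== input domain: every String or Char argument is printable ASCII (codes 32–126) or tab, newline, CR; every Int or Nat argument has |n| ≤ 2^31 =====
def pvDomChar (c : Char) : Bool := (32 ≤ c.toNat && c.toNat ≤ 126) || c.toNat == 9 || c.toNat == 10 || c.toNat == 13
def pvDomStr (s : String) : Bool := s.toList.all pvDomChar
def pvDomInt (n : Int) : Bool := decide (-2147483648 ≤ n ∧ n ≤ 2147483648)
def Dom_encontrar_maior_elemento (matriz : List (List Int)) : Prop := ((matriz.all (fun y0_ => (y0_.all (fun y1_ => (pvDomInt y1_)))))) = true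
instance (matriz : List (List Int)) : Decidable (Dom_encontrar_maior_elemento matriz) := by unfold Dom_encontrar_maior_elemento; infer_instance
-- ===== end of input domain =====

-- B replaces A's single combined running-max-with-indices loop by two staged passes: a
-- value-only maximum pass, then an early-returning search for the first row-major position
-- equal to that maximum; same cost, a different decomposition.

-- ===== PORT A =====
def encontrar_maior_elemento (matriz : List (List Int)) : Int × Int × Int :=
  let maior := PySem.List.pyGetD (PySem.List.pyGetD matriz 0 []) 0 0
  (PySem.List.pyRange 0 (PySem.List.len matriz)).foldl
    (fun st i =>
      (PySem.List.pyRange 0 (PySem.List.len (PySem.List.pyGetD matriz i []))).foldl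
        (fun st j =>
          let v := PySem.List.pyGetD (PySem.List.pyGetD matriz i []) j 0
          if v > st.1 then (v, i, j) else st)
        st)
    (maior, 0, 0)

-- ===== PORT B =====
-- B's inner early-returning 'for j, v in enumerate(linha)' loop
def pvFindRow (maior i : Int) : List (Int × Int) → Option (Int × Int)
  | [] => none
  | (j, v) :: resto => if v == maior then some (i, j) else pvFindRow maior i resto

-- B's outer early-returning 'for i, linha in enumerate(matriz)' loop
def pvFindPos (maior : Int) : List (Int × List Int) → Option (Int × Int)
  | [] => none
  | (i, linha) :: resto =>
    match pvFindRow maior i (PySem.List.enumerate linha) with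
    | some p => some p
    | none => pvFindPos maior resto

def encontrar_maior_elemento_alt (matriz : List (List Int)) : Int × Int × Int :=
  let maior := matriz.foldl
    (fun m linha => linha.foldl (fun m v => if v > m then v else m) m)
    (PySem.List.pyGetD (PySem.List.pyGetD matriz 0 []) 0 0)
  match pvFindPos maior (PySem.List.enumerate matriz) with
  | some (i, j) => (maior, i, j)
  | none => (maior, 0, 0)

-- ===== PRECONDITION & SPEC =====
-- Pre_ excludes exactly the inputs where A raises IndexError: an empty matrix or an empty first row.
def Pre_encontrar_maior_elemento (matriz : List (List Int)) : Prop :=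
  matriz ≠ [] ∧ matriz.headD [] ≠ []
instance (matriz : List (List Int)) : Decidable (Pre_encontrar_maior_elemento matriz) := by
  unfold Pre_encontrar_maior_elemento; infer_instance
def pvWitness_encontrar_maior_elemento : List (List Int) := [[1, 2], [3, 0]]

def Spec_encontrar_maior_elemento (matriz : List (List Int)) (out : Int × Int × Int) : Prop := out = encontrar_maior_elemento_alt matriz
instance (matriz : List (List Int)) (out : Int × Int × Int) : Decidable (Spec_encontrar_maior_elemento matriz out) := by unfold Spec_encontrar_maior_elemento; infer_instance

-- ===== CLAIM (what is proved, stated in full; the proofs are below) =====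
def Claim_equal_encontrar_maior_elemento : Prop := ∀ (matriz : List (List Int)), Dom_encontrar_maior_elemento matriz → Pre_encontrar_maior_elemento matriz → Spec_encontrar_maior_elemento matriz (encontrar_maior_elemento matriz)

-- ===== LEMMAS AND PROOFS =====

-- the running-maximum update A performs, on (value, i, j) triples
def pvUpd (st t : Int × Int × Int) : Int × Int × Int := if t.1 > st.1 then t else st

-- A's nested index loops are the fold of pvUpd over the flattened (value, i, j) list
theorem encA_eq_foldl_flat (matriz : List (List Int)) :
    encontrar_maior_elemento matriz =
      ((PySem.List.enumerate matriz).flatMap (fun p =>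
          (PySem.List.enumerate p.2).map (fun q => (q.2, p.1, q.1)))).foldl pvUpd
        (PySem.List.pyGetD (PySem.List.pyGetD matriz 0 []) 0 0, 0, 0) := by
  rw [encontrar_maior_elemento, List.foldl_flatMap]
  rw [PySem.List.enumerate_eq_map_pyRange matriz ([] : List Int), List.foldl_map]
  congr 1
  funext st i
  rw [PySem.List.enumerate_eq_map_pyRange (PySem.List.pyGetD matriz i []) (0 : Int),
      List.foldl_map, List.foldl_map]
  rfl

-- B's strict running-max step is Int.max
theorem pvMax_eq_max : (fun m v : Int => if v > m then v else m) = max := by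
  funext a b
  simp only [gt_iff_lt, max_def]
  split_ifs <;> omega

-- the value component of A's fold is the running max of the values
theorem foldl_pvUpd_fst (ts : List (Int × Int × Int)) (t0 : Int × Int × Int) :
    (ts.foldl pvUpd t0).1 = (ts.map (·.1)).foldl max t0.1 := by
  induction ts generalizing t0 with
  | nil => rfl
  | cons t ts ih =>
    simp only [List.foldl_cons, List.map_cons, ih]
    congr 1
    simp only [pvUpd, max_def, gt_iff_lt]
    split_ifs <;> first | rfl | omega

theorem seed_le_foldl_pvUpd (ts : List (Int × Int × Int)) (t0 : Int × Int × Int) :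
    t0.1 ≤ (ts.foldl pvUpd t0).1 := by
  rw [foldl_pvUpd_fst]
  exact (PySem.List.le_foldl_max (ts.map (·.1)) t0.1).1

-- A's fold result is the FIRST element of the seeded list whose value equals the fold's value
theorem find?_foldl_pvUpd (ts : List (Int × Int × Int)) (t0 : Int × Int × Int) :
    (t0 :: ts).find? (fun t => t.1 == (ts.foldl pvUpd t0).1) = some (ts.foldl pvUpd t0) := by
  induction ts generalizing t0 with
  | nil => simp [List.find?]
  | cons t ts ih =>
    simp only [List.foldl_cons]
    by_cases h : t.1 > t0.1
    · have hupd : pvUpd t0 t = t := by simp [pvUpd, h]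
      rw [hupd]
      have hle : t.1 ≤ (ts.foldl pvUpd t).1 := seed_le_foldl_pvUpd ts t
      have hne' : ¬ ((t0.1 == (ts.foldl pvUpd t).1) = true) := by
        simp only [beq_iff_eq]; omega
      rw [List.find?_cons_of_neg (p := fun x : Int × Int × Int => x.1 == (ts.foldl pvUpd t).1) hne']
      exact ih t
    · have hupd : pvUpd t0 t = t0 := by simp [pvUpd, h]
      rw [hupd]
      have hle : t0.1 ≤ (ts.foldl pvUpd t0).1 := seed_le_foldl_pvUpd ts t0
      by_cases h0 : t0.1 = (ts.foldl pvUpd t0).1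
      · have hpos : ((t0.1 == (ts.foldl pvUpd t0).1) = true) := by
          simp [h0]
        have := ih t0
        rw [List.find?_cons_of_pos (p := fun x : Int × Int × Int => x.1 == (ts.foldl pvUpd t0).1) hpos] at this
        rw [List.find?_cons_of_pos (p := fun x : Int × Int × Int => x.1 == (ts.foldl pvUpd t0).1) hpos]
        exact this
      · have hne0 : ¬ ((t0.1 == (ts.foldl pvUpd t0).1) = true) := by
          simp only [beq_iff_eq]; exact h0
        have hnet : ¬ ((t.1 == (ts.foldl pvUpd t0).1) = true) := by
          simp only [beq_iff_eq]; omega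
        rw [List.find?_cons_of_neg (p := fun x : Int × Int × Int => x.1 == (ts.foldl pvUpd t0).1) hne0,
            List.find?_cons_of_neg (p := fun x : Int × Int × Int => x.1 == (ts.foldl pvUpd t0).1) hnet]
        have := ih t0
        rwa [List.find?_cons_of_neg (p := fun x : Int × Int × Int => x.1 == (ts.foldl pvUpd t0).1) hne0] at this

-- B's inner loop is find? over the row's flattened triples
theorem pvFindRow_eq_find? (maior i : Int) (l : List (Int × Int)) :
    pvFindRow maior i l =
      ((l.map (fun q => (q.2, i, q.1))).find? (fun t => t.1 == maior)).map (·.2) := by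
  induction l with
  | nil => rfl
  | cons q l ih =>
    obtain ⟨j, v⟩ := q
    simp only [pvFindRow, List.map_cons]
    by_cases h : (v == maior) = true
    · rw [List.find?_cons_of_pos (p := fun t : Int × Int × Int => t.1 == maior) h, if_pos h]
      rfl
    · rw [List.find?_cons_of_neg (p := fun t : Int × Int × Int => t.1 == maior) h, if_neg h]
      exact ih

-- B's outer loop is find? over the whole flattened triple list
theorem pvFindPos_eq_find? (maior : Int) (l : List (Int × List Int)) :
    pvFindPos maior l =
      ((l.flatMap (fun p => (PySem.List.enumerate p.2).map (fun q => (q.2, p.1, q.1)))).find?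
        (fun t => t.1 == maior)).map (·.2) := by
  induction l with
  | nil => rfl
  | cons p l ih =>
    obtain ⟨i, linha⟩ := p
    simp only [pvFindPos, List.flatMap_cons, List.find?_append]
    rw [pvFindRow_eq_find? maior i (PySem.List.enumerate linha)]
    cases hfind : ((PySem.List.enumerate linha).map (fun q => (q.2, i, q.1))).find?
        (fun t => t.1 == maior) with
    | none => simp [ih]
    | some t => simp

-- the values of the flattened triples, in order, are the matrix values in row-major order
theorem flat_map_fst (l : List (Int × List Int)) :
    ((l.flatMap (fun p => (PySem.List.enumerate p.2).map (fun q => (q.2, p.1, q.1)))).map (·.1)) =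
      l.flatMap (·.2) := by
  induction l with
  | nil => rfl
  | cons p l ih =>
    simp only [List.flatMap_cons, List.map_append, ih, List.map_map]
    congr 1
    have : ((PySem.List.enumerate p.2).map ((·.1) ∘ fun q => (q.2, p.1, q.1))) =
        (PySem.List.enumerate p.2).map (·.2) := rfl
    rw [this, PySem.List.map_snd_enumerate]

-- flattening the rows of an enumeration forgets the indices
theorem enum_flatMap_snd (l : List (List Int)) (s : Int) :
    (PySem.List.enumerate l s).flatMap (·.2) = l.flatMap (fun linha => linha) := by
  induction l generalizing s with
  | nil => rfl
  | cons a l ih => simp [PySem.List.enumerate_cons, List.flatMap_cons, ih]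

-- B's first pass is the running max over the row-major values
theorem bmax_eq (matriz : List (List Int)) (seed : Int) :
    matriz.foldl (fun m linha => linha.foldl (fun m v => if v > m then v else m) m) seed =
      ((PySem.List.enumerate matriz).flatMap (·.2)).foldl max seed := by
  rw [pvMax_eq_max, enum_flatMap_snd matriz 0, List.foldl_flatMap]

-- ===== VERDICT (by name: the statement is the Claim_ definition above) =====
theorem encontrar_maior_elemento_spec : Claim_equal_encontrar_maior_elemento := by
  intro matriz _ hpre
  obtain ⟨hne, hrow⟩ := hpre
  obtain ⟨r0, rest, rfl⟩ : ∃ r0 rest, matriz = r0 :: rest := by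
    cases matriz with
    | nil => exact absurd rfl hne
    | cons a l => exact ⟨a, l, rfl⟩
  obtain ⟨v, r0t, rfl⟩ : ∃ v r0t, r0 = v :: r0t := by
    cases r0 with
    | nil => exact absurd rfl hrow
    | cons a l => exact ⟨a, l, rfl⟩
  show Spec_encontrar_maior_elemento _ _
  unfold Spec_encontrar_maior_elemento encontrar_maior_elemento_alt
  set M := (v :: r0t) :: rest with hM
  have hseed : PySem.List.pyGetD (PySem.List.pyGetD M 0 []) 0 0 = v := by
    simp [hM, PySem.List.pyGetD, PySem.List.pyGet?, PySem.List.pyIdx?]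
  set flat := (PySem.List.enumerate M).flatMap (fun p =>
      (PySem.List.enumerate p.2).map (fun q => (q.2, p.1, q.1))) with hflatdef
  have hflat : flat = (v, 0, 0) :: ((PySem.List.enumerate r0t 1).map (fun q => (q.2, 0, q.1)) ++
        (PySem.List.enumerate rest 1).flatMap (fun p =>
          (PySem.List.enumerate p.2).map (fun q => (q.2, p.1, q.1)))) := by
    simp [hflatdef, hM, PySem.List.enumerate_cons]
  -- A's result
  set ts := ((PySem.List.enumerate r0t 1).map (fun q => (q.2, 0, q.1)) ++
        (PySem.List.enumerate rest 1).flatMap (fun p =>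
          (PySem.List.enumerate p.2).map (fun q => (q.2, p.1, q.1)))) with hts
  set R := ts.foldl pvUpd (v, 0, 0) with hR
  have hA : encontrar_maior_elemento M = R := by
    rw [encA_eq_foldl_flat, hseed, ← hflatdef, hflat]
    simp [hR, hts, pvUpd]
  -- B's maior equals R.1
  have hmaior : M.foldl (fun m linha => linha.foldl (fun m v => if v > m then v else m) m)
      (PySem.List.pyGetD (PySem.List.pyGetD M 0 []) 0 0) = R.1 := by
    rw [hseed, bmax_eq, ← flat_map_fst, ← hflatdef, hflat, hR, foldl_pvUpd_fst]
    simp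
  rw [hmaior]
  -- B's search finds exactly R
  have hsearch : pvFindPos R.1 (PySem.List.enumerate M) = some (R.2.1, R.2.2) := by
    rw [pvFindPos_eq_find?, ← hflatdef, hflat, hR, find?_foldl_pvUpd]
    rfl
  rw [hA]
  simp only [hsearch]
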